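-- pv_equiv track=rewrite | github.com/Alexandre-petitjean/my_advend_of_code_2019 | day4/day_4.py | same_adj_digit_part2
-- ===== SOURCE A (Python) =====
-- def same_adj_digit_part2(number):
--     """
--     Test if the same digit are adjacent for the part 2.
--     :param number: the number to test.
--     :return: True if the test is ok else return False
--     """
--     result = False
--     string = str(number)
--     i = 1
--     j = 0
--     while i < string.__len__() and result is False:
--         if string[i] == string[j]:
--             count = 0
--             while j <= string.__len__() - 1 and string[i] == string[j]:
--                 j += 1
--                 count += 1
--             if count == 2:
--                 result = True
--             i = j
--         else:
--             i = i + 1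
--             j = j + 1
--     return result
-- ===== SOURCE B (Python) =====
-- def same_adj_digit_part2(number):
--     s = str(number)
--     lengths = []
--     run = 1
--     for a, b in zip(s, s[1:]):
--         if a == b:
--             run += 1
--         else:
--             lengths.append(run)
--             run = 1
--     lengths.append(run)
--     return 2 in lengths
-- ===== Notes on version B (the rewrite author's own statement) =====
-- stated objective: idiomatic
-- what changed: A's manual i/j index-walking with a nested counting while-loop and early exit is replaced by a single pass over adjacent character pairs that collects all run lengths into a list, followed by a membership test '2 in lengths'.
import Mathlib
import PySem

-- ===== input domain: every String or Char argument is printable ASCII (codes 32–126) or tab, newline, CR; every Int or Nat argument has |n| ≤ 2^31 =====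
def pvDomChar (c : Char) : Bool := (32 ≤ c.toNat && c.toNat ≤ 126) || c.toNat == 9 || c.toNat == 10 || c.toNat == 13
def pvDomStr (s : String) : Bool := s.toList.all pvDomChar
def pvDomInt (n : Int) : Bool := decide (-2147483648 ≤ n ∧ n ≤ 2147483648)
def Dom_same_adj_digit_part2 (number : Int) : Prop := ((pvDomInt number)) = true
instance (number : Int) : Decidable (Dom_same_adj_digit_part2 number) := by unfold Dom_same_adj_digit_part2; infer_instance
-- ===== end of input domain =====

-- B replaces A's manual i/j index walk with one pass that collects all run lengths, then a '2 ∈ lengths' test (idiomatic; same cost).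

-- ===== PORT A =====
-- inner while loop: 'while j <= len-1 and string[i] == string[j]: j += 1; count += 1'
-- (fuel only makes the recursion structural; s.length + 1 is passed at the call site, which is
--  more than the loop can ever iterate, so the fuel-0 branch is never the one that stops the loop)
def pvAInner (s : List Char) (i : Nat) : Nat → Nat → Nat → Nat × Nat
  | 0, j, count => (j, count)
  | fuel + 1, j, count =>
    if (j : Int) ≤ (s.length : Int) - 1 ∧ PySem.List.pyGet? s (i : Int) = PySem.List.pyGet? s (j : Int) then
      pvAInner s i fuel (j + 1) (count + 1)
    else (j, count)

-- outer while loop: 'while i < len(string) and result is False' (fuel as above: i strictly grows)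
def pvAOuter (s : List Char) : Nat → Nat → Nat → Bool → Bool
  | 0, _, _, result => result
  | fuel + 1, i, j, result =>
    if i < s.length ∧ result = false then
      if PySem.List.pyGet? s (i : Int) = PySem.List.pyGet? s (j : Int) then
        let p := pvAInner s i (s.length + 1) j 0
        pvAOuter s fuel p.1 p.1 (if p.2 = 2 then true else result)
      else
        pvAOuter s fuel (i + 1) (j + 1) result
    else result

def same_adj_digit_part2 (number : Int) : Bool :=
  let string := (PySem.Int.toStr number).toList
  pvAOuter string (string.length + 1) 1 0 false

-- ===== PORT B =====
-- fold over zip(s, s[1:]) with state (lengths, run), then 'lengths.append(run); return 2 in lengths'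
def pvBStep (acc : List Nat × Nat) (p : Char × Char) : List Nat × Nat :=
  if p.1 = p.2 then (acc.1, acc.2 + 1) else (acc.1 ++ [acc.2], 1)

def same_adj_digit_part2_alt (number : Int) : Bool :=
  let s := (PySem.Int.toStr number).toList
  let st := (s.zip s.tail).foldl pvBStep ([], 1)
  (st.1 ++ [st.2]).contains 2

-- ===== PRECONDITION & SPEC =====
def Spec_same_adj_digit_part2 (number : Int) (out : Bool) : Prop := out = same_adj_digit_part2_alt number
instance (number : Int) (out : Bool) : Decidable (Spec_same_adj_digit_part2 number out) := by unfold Spec_same_adj_digit_part2; infer_instance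

-- ===== CLAIM (what is proved, stated in full; the proofs are below) =====
def Claim_equal_same_adj_digit_part2 : Prop := ∀ (number : Int), Dom_same_adj_digit_part2 number → Spec_same_adj_digit_part2 number (same_adj_digit_part2 number)

-- ===== LEMMAS AND PROOFS =====

-- reference: the list of maximal-run lengths of a character list
def pvRuns : List Char → List Nat
  | [] => []
  | c :: cs => ((cs.takeWhile (· = c)).length + 1) :: pvRuns (cs.dropWhile (· = c))
termination_by l => l.length
decreasing_by
  have := List.length_dropWhile_le (p := fun x => decide (x = c)) (l := cs)
  simp; omega

-- reference early-exit check: does some maximal run have length exactly 2?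
def pvChk : List Char → Bool
  | [] => false
  | c :: cs => if (cs.takeWhile (· = c)).length + 1 = 2 then true else pvChk (cs.dropWhile (· = c))
termination_by l => l.length
decreasing_by
  have := List.length_dropWhile_le (p := fun x => decide (x = c)) (l := cs)
  simp; omega

theorem pv_takeWhile_len_le (p : Char → Bool) (l : List Char) :
    (l.takeWhile p).length ≤ l.length := by
  induction l with
  | nil => simp
  | cons a as ih => rw [List.takeWhile_cons]; split <;> simp <;> omega

-- dropWhile as a drop of the takeWhile length (aligns A's index jumps with pvChk)
theorem pv_dropWhile_eq_drop (p : Char -> Bool) (l : List Char) :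
    l.dropWhile p = l.drop (l.takeWhile p).length := by
  conv_lhs => rw [show l.dropWhile p = (l.takeWhile p ++ l.dropWhile p).drop (l.takeWhile p).length from (List.drop_left ..).symm,
    List.takeWhile_append_dropWhile]

theorem pvChk_eq_mem_runs (l : List Char) : pvChk l = ((pvRuns l).contains 2) := by
  induction l using pvChk.induct with
  | case1 => rw [pvChk, pvRuns]; rfl
  | case2 c cs h => rw [pvChk, pvRuns, if_pos h, h]; rw [List.contains_cons]; rfl
  | case3 c cs h ih =>
    rw [pvChk, pvRuns, if_neg h, ih]
    have h2 : (2 == (cs.takeWhile (· = c)).length + 1) = false := by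
      simp only [beq_eq_false_iff_ne, ne_eq]; omega
    rw [List.contains_cons, h2, Bool.false_or]

-- the inner loop counts the run of s[i] starting at position j (given enough fuel)
theorem pvAInner_eq (s : List Char) (i : Nat) (a : Char)
    (ha : PySem.List.pyGet? s (i : Int) = some a) :
    ∀ (fuel j count : Nat), ((s.drop j).takeWhile (· = a)).length ≤ fuel →
    pvAInner s i fuel j count =
      (j + ((s.drop j).takeWhile (· = a)).length, count + ((s.drop j).takeWhile (· = a)).length) := by
  intro fuel
  induction fuel with
  | zero =>
    intro j count hf
    rw [Nat.le_zero] at hf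
    rw [pvAInner, hf]
    simp
  | succ fuel ih =>
    intro j count hf
    by_cases h : (j : Int) ≤ (s.length : Int) - 1 ∧ PySem.List.pyGet? s (i : Int) = PySem.List.pyGet? s (j : Int)
    · obtain ⟨hj, he⟩ := h
      rw [ha] at he
      have hjs : s[j]? = some a := by rw [← PySem.List.pyGet?_natCast, ← he]
      have hjl : j < s.length := (List.getElem?_eq_some_iff.mp hjs).1
      have hja : s[j] = a := by simpa [List.getElem?_eq_getElem hjl] using hjs
      have hdrop : s.drop j = s[j] :: s.drop (j + 1) := List.drop_eq_getElem_cons hjl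
      have ht1 : ((s.drop j).takeWhile (· = a)).length
          = ((s.drop (j + 1)).takeWhile (· = a)).length + 1 := by
        rw [hdrop, List.takeWhile_cons, hja]; simp
      rw [pvAInner, if_pos ⟨hj, by rw [ha, ← he]⟩, ih (j + 1) (count + 1) (by omega)]
      simp only [Prod.mk.injEq]
      omega
    · rw [pvAInner, if_neg h]
      rcases Decidable.em ((j : Int) ≤ (s.length : Int) - 1) with hj | hj
      · have he : ¬ PySem.List.pyGet? s (i : Int) = PySem.List.pyGet? s (j : Int) := fun c => h ⟨hj, c⟩
        rw [ha] at he
        have hjl : j < s.length := by omega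
        have hja : ¬ (s[j] = a) := by
          intro hc
          exact he (by rw [PySem.List.pyGet?_natCast, List.getElem?_eq_getElem hjl, hc])
        rw [List.drop_eq_getElem_cons hjl, List.takeWhile_cons]
        simp [hja]
      · have hle : s.length ≤ j := by omega
        rw [List.drop_eq_nil_of_le hle]
        simp

-- once result is True the outer loop does nothing more
theorem pvAOuter_true (s : List Char) : ∀ (fuel i j : Nat), pvAOuter s fuel i j true = true
  | 0, _, _ => rfl
  | fuel + 1, i, j => by rw [pvAOuter, if_neg (fun h => by simpa using h.2)]

-- run phase: i = j, result still false (fuel ≥ the characters left to scan)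
theorem pvAOuter_run (s : List Char) :
    ∀ (fuel i : Nat), s.length ≤ i + fuel → pvAOuter s fuel i i false = pvChk (s.drop i) := by
  intro fuel
  induction fuel with
  | zero =>
    intro i hn
    rw [pvAOuter, List.drop_eq_nil_of_le (by omega), pvChk]
  | succ n ih =>
    intro i hn
    by_cases hil : i < s.length
    · have ha : PySem.List.pyGet? s (i : Int) = some s[i] := by
        rw [PySem.List.pyGet?_natCast, List.getElem?_eq_getElem hil]
      have hfb : ((s.drop i).takeWhile (· = s[i])).length ≤ s.length + 1 := by
        have h1 := pv_takeWhile_len_le (· = s[i]) (s.drop i)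
        rw [List.length_drop] at h1
        omega
      rw [pvAOuter, if_pos ⟨hil, rfl⟩, if_pos rfl]
      simp only [pvAInner_eq s i s[i] ha (s.length + 1) i 0 hfb]
      have hdrop : s.drop i = s[i] :: s.drop (i + 1) := List.drop_eq_getElem_cons hil
      have ht1 : ((s.drop i).takeWhile (· = s[i])).length
          = ((s.drop (i + 1)).takeWhile (· = s[i])).length + 1 := by
        rw [hdrop, List.takeWhile_cons]; simp
      by_cases h2 : 0 + ((s.drop i).takeWhile (· = s[i])).length = 2
      · rw [if_pos h2, pvAOuter_true]
        rw [hdrop, pvChk, if_pos (by omega)]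
      · rw [if_neg h2, ih (i + ((s.drop i).takeWhile (· = s[i])).length) (by rw [ht1]; omega)]
        rw [hdrop, pvChk, if_neg (by omega)]
        have hidx : i + ((s[i] :: s.drop (i + 1)).takeWhile (· = s[i])).length
            = i + 1 + ((s.drop (i + 1)).takeWhile (· = s[i])).length := by
          rw [List.takeWhile_cons]
          simp
          omega
        rw [hidx, pv_dropWhile_eq_drop, List.drop_drop]
    · rw [pvAOuter, if_neg (fun h => hil h.1), List.drop_eq_nil_of_le (by omega), pvChk]

-- search phase: j = i - 1 (fuel ≥ the characters left to scan)
theorem pvAOuter_search (s : List Char) :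
    ∀ (fuel i : Nat), s.length ≤ i + fuel → pvAOuter s fuel (i + 1) i false = pvChk (s.drop i) := by
  intro fuel
  induction fuel with
  | zero =>
    intro i hn
    rw [pvAOuter, List.drop_eq_nil_of_le (by omega), pvChk]
  | succ n ih =>
    intro i hn
    by_cases hil : i < s.length
    · by_cases hil1 : i + 1 < s.length
      · have ha0 : PySem.List.pyGet? s (i : Int) = some s[i] := by
          rw [PySem.List.pyGet?_natCast, List.getElem?_eq_getElem hil]
        have ha1 : PySem.List.pyGet? s ((i + 1 : Nat) : Int) = some s[i + 1] := by
          rw [PySem.List.pyGet?_natCast, List.getElem?_eq_getElem hil1]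
        by_cases hch : s[i + 1] = s[i]
        · have hfb : ((s.drop i).takeWhile (· = s[i + 1])).length ≤ s.length + 1 := by
            have h1 := pv_takeWhile_len_le (· = s[i + 1]) (s.drop i)
            rw [List.length_drop] at h1
            omega
          rw [pvAOuter, if_pos ⟨hil1, rfl⟩, if_pos (by rw [ha0, ha1, hch])]
          simp only [pvAInner_eq s (i + 1) s[i + 1] ha1 (s.length + 1) i 0 hfb]
          simp only [hch]
          have hdrop : s.drop i = s[i] :: s.drop (i + 1) := List.drop_eq_getElem_cons hil
          have ht1 : ((s.drop i).takeWhile (· = s[i])).length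
              = ((s.drop (i + 1)).takeWhile (· = s[i])).length + 1 := by
            rw [hdrop, List.takeWhile_cons]; simp
          by_cases h2 : 0 + ((s.drop i).takeWhile (· = s[i])).length = 2
          · rw [if_pos h2, pvAOuter_true]
            rw [hdrop, pvChk, if_pos (by omega)]
          · rw [if_neg h2, pvAOuter_run s n (i + ((s.drop i).takeWhile (· = s[i])).length) (by rw [ht1]; omega)]
            rw [hdrop, pvChk, if_neg (by omega)]
            have hidx : i + ((s[i] :: s.drop (i + 1)).takeWhile (· = s[i])).length
                = i + 1 + ((s.drop (i + 1)).takeWhile (· = s[i])).length := by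
              rw [List.takeWhile_cons]
              simp
              omega
            rw [hidx, pv_dropWhile_eq_drop, List.drop_drop]
        · rw [pvAOuter, if_pos ⟨hil1, rfl⟩,
            if_neg (by rw [ha0, ha1]; exact fun hc => hch (Option.some.inj hc))]
          rw [ih (i + 1) (by omega)]
          rw [List.drop_eq_getElem_cons hil, pvChk]
          have hdrop1 : s.drop (i + 1) = s[i + 1] :: s.drop (i + 2) := List.drop_eq_getElem_cons hil1
          have hch' : (decide (s[i + 1] = s[i])) = false := by simp [hch]
          rw [hdrop1, List.takeWhile_cons, List.dropWhile_cons, hch']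
          simp only [Bool.false_eq_true, if_false, List.length_nil]
          rw [if_neg (by omega), ← hdrop1]
      · rw [pvAOuter, if_neg (fun h => by omega)]
        rw [List.drop_eq_getElem_cons hil, List.drop_eq_nil_of_le (by omega), pvChk]
        simp only [List.takeWhile_nil, List.dropWhile_nil, List.length_nil]
        rw [if_neg (by omega), pvChk]
    · rw [pvAOuter, if_neg (fun h => by omega), List.drop_eq_nil_of_le (by omega), pvChk]

theorem pvB_fold (cs : List Char) (c : Char) (acc : List Nat) (run : Nat) :
    (let st := ((c :: cs).zip cs).foldl pvBStep (acc, run)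
     st.1 ++ [st.2])
    = acc ++ (run + (cs.takeWhile (· = c)).length) :: pvRuns (cs.dropWhile (· = c)) := by
  induction cs generalizing c acc run with
  | nil =>
    simp only [List.zip_nil_right, List.foldl_nil, List.takeWhile_nil, List.dropWhile_nil,
      List.length_nil, Nat.add_zero]
    rw [pvRuns]
  | cons d ds ih =>
    rw [List.zip_cons_cons, List.foldl_cons]
    by_cases hcd : c = d
    · subst hcd
      rw [show pvBStep (acc, run) (c, c) = (acc, run + 1) from by simp [pvBStep], ih]
      rw [List.takeWhile_cons, List.dropWhile_cons]
      simp only [decide_true, if_true, List.length_cons]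
      congr 2
      omega
    · rw [show pvBStep (acc, run) (c, d) = (acc ++ [run], 1) from by simp [pvBStep, hcd], ih]
      have hdc : (decide (d = c)) = false := by
        simp only [decide_eq_false_iff_not]
        exact fun h => hcd (Eq.symm h)
      rw [List.takeWhile_cons, List.dropWhile_cons, hdc]
      simp only [Bool.false_eq_true, if_false, List.length_nil, Nat.add_zero]
      rw [show pvRuns (d :: ds) = ((ds.takeWhile (· = d)).length + 1) :: pvRuns (ds.dropWhile (· = d)) from by rw [pvRuns]]
      have h1 : 1 + (ds.takeWhile (· = d)).length = (ds.takeWhile (· = d)).length + 1 :=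
        Nat.add_comm _ _
      simp [h1]

theorem pv_main (s : List Char) :
    pvAOuter s (s.length + 1) 1 0 false =
      (let st := (s.zip s.tail).foldl pvBStep ([], 1)
       (st.1 ++ [st.2]).contains 2) := by
  cases s with
  | nil =>
    show pvAOuter [] (0 + 1) 1 0 false = _
    rw [pvAOuter, if_neg (by simp)]
    rfl
  | cons c cs =>
    have hs := pvAOuter_search (c :: cs) ((c :: cs).length + 1) 0 (by omega)
    rw [show (c :: cs).length + 1 = cs.length + 1 + 1 from by simp] at *
    norm_num at hs
    rw [hs]
    simp only [List.tail_cons]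
    have hb := pvB_fold cs c [] 1
    simp only [List.nil_append] at hb
    rw [hb, pvChk_eq_mem_runs,
      show pvRuns (c :: cs) = ((cs.takeWhile (· = c)).length + 1) :: pvRuns (cs.dropWhile (· = c))
        from by rw [pvRuns],
      Nat.add_comm 1 ((cs.takeWhile (· = c)).length)]

-- ===== VERDICT (by name: the statement is the Claim_ definition above) =====
theorem same_adj_digit_part2_spec : Claim_equal_same_adj_digit_part2 := by
  intro number _
  unfold Spec_same_adj_digit_part2 same_adj_digit_part2 same_adj_digit_part2_alt
  exact pv_main _
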